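-- pv_equiv track=rewrite | github.com/fgh23333/adk_to_openai_api | app/adk_client.py | _has_significant_overlap
-- ===== SOURCE A (Python) =====
-- def _has_significant_overlap(content1: str, content2: str, min_overlap: int = 10) -> bool:
--     """Check if two content strings have significant overlap."""
--     if not content1 or not content2:
--         return False
--
--     # Find the longest common substring
--     max_overlap = 0
--     len1, len2 = len(content1), len(content2)
--
--     # Check for overlap at different positions
--     for i in range(min(len1, len2)):
--         if content1[:i] == content2[-i:]:
--             max_overlap = max(max_overlap, i)
--         if content1[-i:] == content2[:i]:
--             max_overlap = max(max_overlap, i)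
--
--     return max_overlap >= min_overlap
-- ===== SOURCE B (Python) =====
-- def _has_significant_overlap(content1: str, content2: str, min_overlap: int = 10) -> bool:
--     """Linear-time check via the KMP failure function of one string + NUL + the other."""
--     if not content1 or not content2:
--         return False
--
--     def _overlap(a: str, b: str) -> int:
--         # longest k with a[:k] == b[len(b)-k:], read off the KMP failure function of a + NUL + b
--         t = a + "\x00" + b
--         fail = [0] * len(t)
--         j = 0
--         for i in range(1, len(t)):
--             while j > 0 and t[i] != t[j]:
--                 j = fail[j - 1]
--             if t[i] == t[j]:
--                 j += 1
--             fail[i] = j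
--         return fail[-1]
--
--     return max(_overlap(content1, content2), _overlap(content2, content1)) >= min_overlap
-- ===== Notes on version B (the rewrite author's own statement) =====
-- stated objective: faster
-- what changed: Replaces A's quadratic scan that slice-compares every prefix/suffix split with two KMP failure-function passes over a+NUL+b and b+NUL+a, reading the longest prefix-suffix overlap off the last failure value in linear time.
-- intended difference: On nonempty inputs where the only overlap reaching min_overlap is the full-length one of min(len1,len2) characters (one string's entire prefix equals the other's suffix), A returns False because its loop range(min(len1,len2)) stops one position short of ever testing that full-length overlap, while B returns True, which is the intended behaviour for an overlap detector. — e.g. on _has_significant_overlap("ab", "xab", 2): A returns false, B returns true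
import Mathlib
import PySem

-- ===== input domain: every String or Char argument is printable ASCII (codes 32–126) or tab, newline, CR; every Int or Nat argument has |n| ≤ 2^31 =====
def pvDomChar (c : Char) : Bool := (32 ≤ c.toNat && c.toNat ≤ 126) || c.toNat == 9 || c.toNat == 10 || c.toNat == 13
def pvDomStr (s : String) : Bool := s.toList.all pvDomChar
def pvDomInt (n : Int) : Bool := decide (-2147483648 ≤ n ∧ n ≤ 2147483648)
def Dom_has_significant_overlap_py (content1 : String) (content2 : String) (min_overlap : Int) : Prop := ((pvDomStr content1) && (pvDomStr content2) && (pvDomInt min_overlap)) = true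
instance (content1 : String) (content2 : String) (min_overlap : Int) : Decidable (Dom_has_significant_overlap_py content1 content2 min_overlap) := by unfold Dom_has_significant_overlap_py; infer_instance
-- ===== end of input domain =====

-- B replaces A's quadratic prefix/suffix slice scan by two linear KMP failure-function passes;
-- on inputs whose only sufficient overlap has full length min(len1,len2), A's loop bound misses
-- it (A: False) and B detects it (True) — stated as the intended difference D_ below.


-- ===== PORT A =====
def has_significant_overlap_py (content1 : String) (content2 : String) (min_overlap : Int) : Bool :=
  let l1 := content1.toList
  let l2 := content2.toList
  if l1.isEmpty || l2.isEmpty then false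
  else
    let m : Nat := min l1.length l2.length
    let maxOverlap : Int :=
      (PySem.List.pyRange 0 (m : Int) 1).foldl
        (fun acc i =>
          let acc1 := if PySem.List.slice l1 none (some i) = PySem.List.slice l2 (some (-i)) none
                      then max acc i else acc
          if PySem.List.slice l1 (some (-i)) none = PySem.List.slice l2 none (some i)
          then max acc1 i else acc1)
        (0 : Int)
    decide (min_overlap ≤ maxOverlap)

-- ===== PORT B =====
-- the separator character "\x00" Source B puts between the two strings
def pvSep : Char := Char.ofNat 0

-- the KMP fallback while-loop 'while j > 0 and t[i] != t[j]: j = fail[j-1]'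
-- (fuel = the entry value of j bounds the number of iterations, since j strictly decreases)
def pvFall (t : List Char) (f : List Nat) (c : Char) : Nat → Nat → Nat
  | 0, j => j
  | fuel + 1, j => if 0 < j ∧ c ≠ t.getD j pvSep then pvFall t f c fuel (f.getD (j - 1) 0) else j

-- one iteration of Source B's failure-function for-loop body (index i = idx+1)
def pvKmpStep (t : List Char) (st : List Nat × Nat) (idx : Nat) : List Nat × Nat :=
  let i := idx + 1
  let j1 := pvFall t st.1 (t.getD i pvSep) st.2 st.2
  let j2 := if t.getD i pvSep = t.getD j1 pvSep then j1 + 1 else j1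
  (st.1 ++ [j2], j2)

-- Source B's _overlap helper: last entry of the KMP failure function of a + NUL + b
def pvOverlapKmp (a b : List Char) : Nat :=
  let t := a ++ pvSep :: b
  let st := (List.range (t.length - 1)).foldl (pvKmpStep t) ([0], 0)
  st.1.getLast?.getD 0

def has_significant_overlap_py_alt (content1 : String) (content2 : String) (min_overlap : Int) : Bool :=
  let l1 := content1.toList
  let l2 := content2.toList
  if l1.isEmpty || l2.isEmpty then false
  else decide (min_overlap ≤ (↑(max (pvOverlapKmp l1 l2) (pvOverlapKmp l2 l1)) : Int))

-- ===== PRECONDITION & SPEC =====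
-- On nonempty inputs where the only overlap reaching min_overlap is the full-length one of
-- min(len1,len2) characters (one string's entire prefix equals the other's suffix), A returns
-- False because its loop bound range(min(len1,len2)) never tests that overlap, while B returns
-- True, which is the intended behaviour for an overlap detector.
-- symmetric overlap test: a prefix of one string of length k is a suffix of the other
def pvOv (a b : List Char) (k : Nat) : Prop := a.take k <:+ b ∨ b.take k <:+ a

def D_has_significant_overlap_py (content1 : String) (content2 : String) (min_overlap : Int) : Prop :=
  let a := content1.toList
  let b := content2.toList
  let m := min a.length b.length
  1 ≤ min_overlap ∧ min_overlap ≤ (m : Int) ∧ pvOv a b m ∧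
  ∀ i < m, min_overlap ≤ (i : Int) → ¬ pvOv a b i
instance (content1 : String) (content2 : String) (min_overlap : Int) : Decidable (D_has_significant_overlap_py content1 content2 min_overlap) := by unfold D_has_significant_overlap_py pvOv; infer_instance

def Spec_has_significant_overlap_py (content1 : String) (content2 : String) (min_overlap : Int) (out : Bool) : Prop := ¬ D_has_significant_overlap_py content1 content2 min_overlap → out = has_significant_overlap_py_alt content1 content2 min_overlap
instance (content1 : String) (content2 : String) (min_overlap : Int) (out : Bool) : Decidable (Spec_has_significant_overlap_py content1 content2 min_overlap out) := by unfold Spec_has_significant_overlap_py; infer_instance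

def pvDiffWitness_has_significant_overlap_py : String × String × Int := ("ab", "xab", 2)
def pvDiffWitnessOut_has_significant_overlap_py : Bool × Bool := (false, true)

-- ===== CLAIM (what is proved, stated in full; the proofs are below) =====
def Claim_unchanged_has_significant_overlap_py : Prop := ∀ (content1 : String) (content2 : String) (min_overlap : Int), Dom_has_significant_overlap_py content1 content2 min_overlap → Spec_has_significant_overlap_py content1 content2 min_overlap (has_significant_overlap_py content1 content2 min_overlap)
def Claim_changed_has_significant_overlap_py : Prop := Dom_has_significant_overlap_py (pvDiffWitness_has_significant_overlap_py.1) (pvDiffWitness_has_significant_overlap_py.2.1) (pvDiffWitness_has_significant_overlap_py.2.2) ∧ D_has_significant_overlap_py (pvDiffWitness_has_significant_overlap_py.1) (pvDiffWitness_has_significant_overlap_py.2.1) (pvDiffWitness_has_significant_overlap_py.2.2) ∧ has_significant_overlap_py (pvDiffWitness_has_significant_overlap_py.1) (pvDiffWitness_has_significant_overlap_py.2.1) (pvDiffWitness_has_significant_overlap_py.2.2) = pvDiffWitnessOut_has_significant_overlap_py.1 ∧ has_significant_overlap_py_alt (pvDiffWitness_has_significant_overlap_py.1) (pvDiffWitness_has_significant_overlap_py.2.1)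 (pvDiffWitness_has_significant_overlap_py.2.2) = pvDiffWitnessOut_has_significant_overlap_py.2 ∧ pvDiffWitnessOut_has_significant_overlap_py.1 ≠ pvDiffWitnessOut_has_significant_overlap_py.2
def Claim_exact_has_significant_overlap_py : Prop := ∀ (content1 : String) (content2 : String) (min_overlap : Int), Dom_has_significant_overlap_py content1 content2 min_overlap → D_has_significant_overlap_py content1 content2 min_overlap → has_significant_overlap_py content1 content2 min_overlap ≠ has_significant_overlap_py_alt content1 content2 min_overlap

-- ===== LEMMAS AND PROOFS =====

-- ---------- A-side: the fold as a max over matching split positions ----------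

-- the two slice comparisons of A at split position i, as one boolean
def pvMatch (l1 l2 : List Char) (i : Int) : Bool :=
  decide (PySem.List.slice l1 none (some i) = PySem.List.slice l2 (some (-i)) none) ||
  decide (PySem.List.slice l1 (some (-i)) none = PySem.List.slice l2 none (some i))

lemma pvStep (l1 l2 : List Char) (acc i : Int) :
    (let acc1 := if PySem.List.slice l1 none (some i) = PySem.List.slice l2 (some (-i)) none
                 then max acc i else acc
     if PySem.List.slice l1 (some (-i)) none = PySem.List.slice l2 none (some i)
     then max acc1 i else acc1)
    = if pvMatch l1 l2 i then max acc i else acc := by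
  simp only [pvMatch]
  split_ifs with h1 h2 h2 <;> simp_all

lemma pvFoldMax (p : Int → Bool) (L : List Int) (acc t : Int) :
    t ≤ L.foldl (fun a i => if p i then max a i else a) acc ↔
      t ≤ acc ∨ ∃ i ∈ L, p i ∧ t ≤ i := by
  induction L generalizing acc with
  | nil => simp
  | cons j L ih =>
      simp only [List.foldl_cons, ih, List.mem_cons]
      constructor
      · rintro (h | ⟨i, hi, hp, ht⟩)
        · by_cases hj : p j = true
          · simp only [hj, if_true, le_max_iff] at h
            rcases h with h' | h'
            · exact Or.inl h'
            · exact Or.inr ⟨j, Or.inl rfl, hj, h'⟩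
          · simp only [hj] at h; simp at h; exact Or.inl h
        · exact Or.inr ⟨i, Or.inr hi, hp, ht⟩
      · rintro (h | ⟨i, (rfl | hi), hp, ht⟩)
        · left; split_ifs <;> omega
        · left; simp [hp]; omega
        · exact Or.inr ⟨i, hi, hp, ht⟩

-- ---------- border theory ----------
def pvPBb (u : List Char) (k : Nat) : Bool :=
  decide (k < u.length) && decide (u.take k = u.drop (u.length - k))

lemma pvSuffix_eq_drop (l u : List Char) (h : l <:+ u) : l = u.drop (u.length - l.length) := by
  obtain ⟨p, rfl⟩ := h
  simp

lemma pvPBb_iff (u : List Char) (k : Nat) :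
    pvPBb u k = true ↔ k < u.length ∧ u.take k = u.drop (u.length - k) := by
  simp [pvPBb]

lemma pvPBb_iff_suffix (u : List Char) (k : Nat) :
    pvPBb u k = true ↔ k < u.length ∧ u.take k <:+ u := by
  rw [pvPBb_iff]
  constructor
  · rintro ⟨h, he⟩
    exact ⟨h, he ▸ List.drop_suffix _ _⟩
  · rintro ⟨h, hs⟩
    refine ⟨h, ?_⟩
    have h2 := pvSuffix_eq_drop _ _ hs
    rwa [List.length_take, Nat.min_eq_left (Nat.le_of_lt h)] at h2

lemma pvSuffix_of_suffix (x y u : List Char) (hx : x <:+ u) (hy : y <:+ u)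
    (h : x.length ≤ y.length) : x <:+ y := by
  have hyu : y.length ≤ u.length := List.IsSuffix.length_le hy
  have hx' := pvSuffix_eq_drop x u hx
  have hy' := pvSuffix_eq_drop y u hy
  have key : (u.drop (u.length - y.length)).drop (y.length - x.length) = u.drop (u.length - x.length) := by
    rw [List.drop_drop]; congr 1; omega
  rw [hx', ← key, ← hy']
  exact List.drop_suffix _ _

lemma pvPBb_down (u : List Char) (j k : Nat) (hj : pvPBb u j = true)
    (hk : pvPBb u k = true) (hkj : k < j) : pvPBb (u.take j) k = true := by
  rw [pvPBb_iff_suffix] at *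
  obtain ⟨hj1, hj2⟩ := hj
  obtain ⟨hk1, hk2⟩ := hk
  have hlen : (u.take j).length = j := by simp; omega
  refine ⟨by omega, ?_⟩
  have : (u.take j).take k = u.take k := by
    rw [List.take_take]; congr 1; omega
  rw [this]
  apply pvSuffix_of_suffix _ _ u hk2 hj2
  simp; omega

lemma pvPBb_up (u : List Char) (j k : Nat) (hj : pvPBb u j = true)
    (hk : pvPBb (u.take j) k = true) : pvPBb u k = true := by
  rw [pvPBb_iff_suffix] at *
  obtain ⟨hj1, hj2⟩ := hj
  obtain ⟨hk1, hk2⟩ := hk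
  have hlen : (u.take j).length = j := by simp; omega
  have hkj : k < j := by omega
  have : (u.take j).take k = u.take k := by
    rw [List.take_take]; congr 1; omega
  rw [this] at hk2
  exact ⟨by omega, hk2.trans hj2⟩

lemma pvPBb_ext (u : List Char) (a : Char) (k : Nat) :
    pvPBb (u ++ [a]) (k + 1) = true ↔
      pvPBb u k = true ∧ u.getD k pvSep = a := by
  rw [pvPBb_iff, pvPBb_iff]
  simp only [List.length_append, List.length_singleton]
  constructor
  · rintro ⟨h1, h2⟩
    have hk : k < u.length := by omega
    have ht : (u ++ [a]).take (k+1) = u.take k ++ [u[k]] := by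
      rw [List.take_append_of_le_length (by omega), List.take_succ]
      simp [List.getElem?_eq_getElem hk]
    have hd : (u ++ [a]).drop (u.length + 1 - (k+1)) = u.drop (u.length - k) ++ [a] := by
      rw [List.drop_append_of_le_length (by omega)]
      congr 2; omega
    rw [ht, hd] at h2
    have hlen : (u.take k).length = (u.drop (u.length - k)).length := by simp; omega
    obtain ⟨e1, e2⟩ := List.append_inj h2 (by simpa using hlen)
    have : u[k] = a := by simpa using e2
    exact ⟨⟨hk, e1⟩, by simp [List.getD_eq_getElem?_getD, List.getElem?_eq_getElem hk, this]⟩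
  · rintro ⟨⟨hk, he⟩, hg⟩
    refine ⟨by omega, ?_⟩
    have ht : (u ++ [a]).take (k+1) = u.take k ++ [u[k]] := by
      rw [List.take_append_of_le_length (by omega), List.take_succ]
      simp [List.getElem?_eq_getElem hk]
    have hd : (u ++ [a]).drop (u.length + 1 - (k+1)) = u.drop (u.length - k) ++ [a] := by
      rw [List.drop_append_of_le_length (by omega)]
      congr 2; omega
    rw [ht, hd, he]
    congr 1
    simp only [List.getD_eq_getElem?_getD, List.getElem?_eq_getElem hk, Option.getD_some] at hg
    simp [hg]

def pvMaxBorder (u : List Char) : Nat :=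
  Nat.findGreatest (fun k => pvPBb u k = true) (u.length - 1)

lemma pvPBb_zero (u : List Char) (hu : u ≠ []) : pvPBb u 0 = true := by
  rw [pvPBb_iff]
  exact ⟨List.length_pos_iff.mpr hu, by simp⟩

lemma pvMaxBorder_lt (u : List Char) (hu : u ≠ []) : pvMaxBorder u < u.length := by
  have h := Nat.findGreatest_le (P := fun k => pvPBb u k = true) (n := u.length - 1)
  have : 0 < u.length := List.length_pos_iff.mpr hu
  unfold pvMaxBorder
  omega

lemma pvMaxBorder_spec (u : List Char) (hu : u ≠ []) : pvPBb u (pvMaxBorder u) = true := by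
  unfold pvMaxBorder
  exact Nat.findGreatest_spec (P := fun k => pvPBb u k = true) (Nat.zero_le _) (pvPBb_zero u hu)

lemma pvMaxBorder_ge (u : List Char) (k : Nat) (h : pvPBb u k = true) : k ≤ pvMaxBorder u := by
  apply Nat.le_findGreatest _ h
  have := (pvPBb_iff u k).mp h
  omega

lemma pvTakeNe (t : List Char) (n : Nat) (h0 : 0 < n) (h1 : 0 < t.length) : t.take n ≠ [] := by
  intro h
  have hl := congrArg List.length h
  rw [List.length_take] at hl
  simp only [List.length_nil] at hl
  omega


lemma pvGetD_take (t : List Char) (i r : Nat) (hr : r < i) (hi : i ≤ t.length) :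
    (t.take i).getD r pvSep = t.getD r pvSep := by
  have h1 : r < (t.take i).length := by simp; omega
  have h2 : r < t.length := by omega
  rw [List.getD_eq_getElem _ _ h1, List.getD_eq_getElem _ _ h2, List.getElem_take]

lemma pvFall_correct (t : List Char) (i : Nat) (hi : i ≤ t.length) (f : List Nat)
    (hf : ∀ l, l + 1 < i → f.getD l 0 = pvMaxBorder (t.take (l + 1))) (c : Char) :
    ∀ fuel j, j ≤ fuel → pvPBb (t.take i) j = true →
      (pvPBb (t.take i) (pvFall t f c fuel j) = true ∧
       (t.getD (pvFall t f c fuel j) pvSep = c ∨ pvFall t f c fuel j = 0) ∧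
       (∀ k, pvPBb (t.take i) k = true → t.getD k pvSep = c → k ≤ j →
          k ≤ pvFall t f c fuel j)) := by
  intro fuel
  induction fuel with
  | zero =>
      intro j hj hb
      have hj0 : j = 0 := by omega
      subst hj0
      exact ⟨hb, Or.inr rfl, fun k _ _ hk => hk⟩
  | succ fuel ih =>
      intro j hj hb
      by_cases hcond : 0 < j ∧ c ≠ t.getD j pvSep
      · obtain ⟨hj0, hne⟩ := hcond
        have hulen : (t.take i).length = i := by simp; omega
        have hji : j < i := by
          have := (pvPBb_iff _ _).mp hb
          omega
        have hjf : f.getD (j - 1) 0 = pvMaxBorder (t.take j) := by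
          have := hf (j - 1) (by omega)
          rwa [show j - 1 + 1 = j by omega] at this
        have htj : t.take j ≠ [] := by
          have : (t.take j).length = j := by simp; omega
          intro h; rw [h] at this; simp at this; omega
        have hbj' : pvPBb (t.take j) (pvMaxBorder (t.take j)) = true := pvMaxBorder_spec _ htj
        have htakej : (t.take i).take j = t.take j := by
          rw [List.take_take]; congr 1; omega
        have hbu : pvPBb (t.take i) (pvMaxBorder (t.take j)) = true := by
          apply pvPBb_up (t.take i) j _ hb
          rwa [htakej]
        have hlt : pvMaxBorder (t.take j) < j := by
          have := pvMaxBorder_lt (t.take j) htj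
          have hl : (t.take j).length = j := by simp; omega
          omega
        have hstep : pvFall t f c (fuel + 1) j = pvFall t f c fuel (pvMaxBorder (t.take j)) := by
          simp only [pvFall]
          rw [if_pos (⟨hj0, hne⟩ : 0 < j ∧ c ≠ t.getD j pvSep), hjf]
        rw [hstep]
        obtain ⟨ih1, ih2, ih3⟩ := ih (pvMaxBorder (t.take j)) (by omega) hbu
        refine ⟨ih1, ih2, ?_⟩
        intro k hk hkc hkj
        rcases Nat.lt_or_ge k j with hlt2 | hge
        · apply ih3 k hk hkc
          have := pvPBb_down (t.take i) j k hb hk hlt2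
          rw [htakej] at this
          exact pvMaxBorder_ge _ _ this
        · have hkj' : k = j := by omega
          subst hkj'
          exact absurd hkc.symm hne
      · have hstep : pvFall t f c (fuel + 1) j = j := by
          simp only [pvFall]
          rw [if_neg hcond]
        rw [hstep]
        refine ⟨hb, ?_, fun k _ _ hk => hk⟩
        push_neg at hcond
        by_cases hj0 : 0 < j
        · exact Or.inl (hcond hj0).symm
        · exact Or.inr (by omega)

-- ---------- KMP loop correctness ----------



lemma pvMaxBorder_one (t : List Char) (ht : t ≠ []) : pvMaxBorder (t.take 1) = 0 := by
  have hl : (t.take 1).length = 1 := by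
    simp [List.length_take]
    exact List.length_pos_iff.mpr ht
  have h1 : t.take 1 ≠ [] := by intro h; rw [h] at hl; simp at hl
  have := pvMaxBorder_lt (t.take 1) h1
  omega

lemma pvKmp_inv (t : List Char) (ht : t ≠ []) (s : Nat) (hs : s ≤ t.length - 1) :
    (((List.range s).foldl (pvKmpStep t) ([0], 0)).1.length = s + 1 ∧
     (∀ l, l ≤ s → ((List.range s).foldl (pvKmpStep t) ([0], 0)).1.getD l 0 =
        pvMaxBorder (t.take (l + 1))) ∧
     ((List.range s).foldl (pvKmpStep t) ([0], 0)).2 = pvMaxBorder (t.take (s + 1))) := by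
  induction s with
  | zero =>
      refine ⟨by simp, ?_, by simpa using (pvMaxBorder_one t ht).symm⟩
      intro l hl
      have hl0 : l = 0 := by omega
      subst hl0
      simpa using (pvMaxBorder_one t ht).symm
  | succ s ih =>
      obtain ⟨ih1, ih2, ih3⟩ := ih (by omega)
      have htlen : 0 < t.length := List.length_pos_iff.mpr ht
      have hi : s + 1 < t.length := by omega
      set st := (List.range s).foldl (pvKmpStep t) ([0], 0) with hst
      have hfold : (List.range (s+1)).foldl (pvKmpStep t) ([0], 0) = pvKmpStep t st s := by
        rw [List.range_succ, List.foldl_append, List.foldl_cons, List.foldl_nil]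
      have hulen : (t.take (s+1)).length = s + 1 := by simp; omega
      have hune : t.take (s+1) ≠ [] := by
        intro h; rw [h] at hulen; simp at hulen
      have hb : pvPBb (t.take (s+1)) st.2 = true := by
        rw [ih3]; exact pvMaxBorder_spec _ hune
      have hf : ∀ l, l + 1 < s + 1 → st.1.getD l 0 = pvMaxBorder (t.take (l + 1)) := by
        intro l hl; exact ih2 l (by omega)
      obtain ⟨r1, r2, r3⟩ :=
        pvFall_correct t (s+1) (by omega) st.1 hf (t.getD (s+1) pvSep) st.2 st.2 le_rfl hb
      set c := t.getD (s+1) pvSep with hc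
      set r := pvFall t st.1 c st.2 st.2 with hr
      set j2 := if c = t.getD r pvSep then r + 1 else r with hj2
      have hnext : t.take (s+2) = t.take (s+1) ++ [t[s+1]] := by
        rw [List.take_add_one, List.getElem?_eq_getElem hi]
        rfl
      have hca : c = t[s+1] := by
        rw [hc, List.getD_eq_getElem _ _ hi]
      have hmem : pvPBb (t.take (s+2)) j2 = true := by
        rw [hnext]
        by_cases hcr : c = t.getD r pvSep
        · rw [hj2, if_pos hcr]
          rw [pvPBb_ext]
          refine ⟨r1, ?_⟩
          have hrlen : r < s + 1 := by
            have := (pvPBb_iff _ _).mp r1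
            omega
          rw [pvGetD_take t (s+1) r hrlen (by omega), ← hcr, hca]
        · rw [hj2, if_neg hcr]
          have hr0 : r = 0 := by
            rcases r2 with h | h
            · exact absurd h.symm hcr
            · exact h
          rw [hr0]
          apply pvPBb_zero
          rw [← hnext]
          exact pvTakeNe t (s+2) (by omega) (by omega)
      have hmax : ∀ k', pvPBb (t.take (s+2)) k' = true → k' ≤ j2 := by
        intro k' hk'
        rcases k' with _ | k
        · omega
        · rw [hnext, pvPBb_ext] at hk'
          obtain ⟨hk1, hk2⟩ := hk'
          have hklen : k < s + 1 := by
            have := (pvPBb_iff _ _).mp hk1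
            omega
          have hkc : t.getD k pvSep = c := by
            rw [← pvGetD_take t (s+1) k hklen (by omega), hk2]
            exact hca.symm
          have hkj : k ≤ st.2 := by
            rw [ih3]; exact pvMaxBorder_ge _ _ hk1
          have hkr : k ≤ r := r3 k hk1 hkc hkj
          by_cases hcr : c = t.getD r pvSep
          · rw [hj2, if_pos hcr]; omega
          · have hr0 : r = 0 := by
              rcases r2 with h | h
              · exact absurd h.symm hcr
              · exact h
            have hk0 : k = 0 := by omega
            subst hk0
            rw [← hr0] at hkc
            exact absurd hkc.symm hcr
      have hj2eq : j2 = pvMaxBorder (t.take (s+2)) := by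
        have h1 : j2 ≤ pvMaxBorder (t.take (s+2)) := pvMaxBorder_ge _ _ hmem
        have hne2 : t.take (s+2) ≠ [] := pvTakeNe t (s+2) (by omega) (by omega)
        have h2 := hmax _ (pvMaxBorder_spec _ hne2)
        omega
      rw [hfold]
      have hstep : pvKmpStep t st s = (st.1 ++ [j2], j2) := by
        simp only [pvKmpStep, ← hc, ← hr, ← hj2]
      rw [hstep]
      refine ⟨by simp [ih1], ?_, by simpa using hj2eq⟩
      intro l hl
      rcases Nat.lt_or_ge l (s+1) with hls | hls
      · have heq : (st.1 ++ [j2]).getD l 0 = st.1.getD l 0 := by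
          rw [List.getD_eq_getElem?_getD, List.getD_eq_getElem?_getD,
              List.getElem?_append_left (by omega)]
        rw [heq]
        exact ih2 l (by omega)
      · have hl1 : l = s + 1 := by omega
        subst hl1
        have heq : (st.1 ++ [j2]).getD (s+1) 0 = j2 := by
          rw [List.getD_eq_getElem?_getD]
          have h9 : (st.1 ++ [j2])[s+1]? = some j2 := by
            rw [List.getElem?_append_right (by omega)]
            simp [ih1]
          rw [h9]
          rfl
        rw [heq]
        simpa using hj2eq

lemma pvOverlapKmp_eq_maxBorder (a b : List Char) :
    pvOverlapKmp a b = pvMaxBorder (a ++ pvSep :: b) := by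
  have ht : (a ++ pvSep :: b) ≠ [] := by simp
  have htlen : 0 < (a ++ pvSep :: b).length := List.length_pos_iff.mpr ht
  obtain ⟨h1, h2, _⟩ := pvKmp_inv (a ++ pvSep :: b) ht ((a ++ pvSep :: b).length - 1) le_rfl
  unfold pvOverlapKmp
  set t := a ++ pvSep :: b
  set F := ((List.range (t.length - 1)).foldl (pvKmpStep t) ([0], 0)).1 with hF
  have hFne : F ≠ [] := by
    intro h; rw [h] at h1; simp at h1
  have hlast : F.getLast?.getD 0 = F.getD (F.length - 1) 0 := by
    rw [List.getLast?_eq_getElem?, List.getD_eq_getElem?_getD]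
  rw [hlast, h1]
  have h3 := h2 (t.length - 1) le_rfl
  simp only [show t.length - 1 + 1 - 1 = t.length - 1 by omega] at h3 ⊢
  rw [h3, show t.length - 1 + 1 = t.length by omega, List.take_length]

-- ---------- the separator argument ----------

lemma pvLenT (a b : List Char) : (a ++ pvSep :: b).length = a.length + b.length + 1 := by
  simp
  omega

lemma pvSepAt (a b : List Char) (h : a.length < (a ++ pvSep :: b).length) :
    (a ++ pvSep :: b)[a.length]'h = pvSep := by
  rw [List.getElem_append_right (le_refl _)]
  simp

lemma pvSep_pos (a b : List Char) (ha : pvSep ∉ a) (hb : pvSep ∉ b)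
    (p : Nat) (hp : p < (a ++ pvSep :: b).length)
    (h : (a ++ pvSep :: b)[p] = pvSep) : p = a.length := by
  rcases Nat.lt_trichotomy p a.length with hlt | heq | hgt
  · exfalso
    rw [List.getElem_append_left hlt] at h
    exact ha (h ▸ List.getElem_mem _)
  · exact heq
  · exfalso
    have hlen := pvLenT a b
    rw [List.getElem_append_right (by omega)] at h
    obtain ⟨q, hq⟩ : ∃ q, p - a.length = q + 1 := ⟨p - a.length - 1, by omega⟩
    simp only [hq] at h
    rw [List.getElem_cons_succ] at h
    exact hb (h ▸ List.getElem_mem _)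

lemma pvTake_sep (a b : List Char) (k : Nat) (hk : k ≤ a.length) :
    (a ++ pvSep :: b).take k = a.take k := by
  rw [List.take_append_of_le_length hk]

lemma pvDrop_sep (a b : List Char) (k : Nat) (hk : k ≤ b.length) :
    (a ++ pvSep :: b).drop ((a ++ pvSep :: b).length - k) = b.drop (b.length - k) := by
  induction a with
  | nil =>
      rw [show (([] : List Char) ++ pvSep :: b).length - k = (b.length - k) + 1 by simp; omega]
      rfl
  | cons c a ih =>
      have hlen : ((c :: a) ++ pvSep :: b).length - k = ((a ++ pvSep :: b).length - k) + 1 := by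
        simp; omega
      rw [hlen]
      exact ih

lemma pvBorder_sep (a b : List Char) (ha : pvSep ∉ a) (hb : pvSep ∉ b) (k : Nat) :
    (pvPBb (a ++ pvSep :: b) k = true ↔
      (k ≤ a.length ∧ k ≤ b.length ∧ a.take k = b.drop (b.length - k))) := by
  have hlen := pvLenT a b
  rw [pvPBb_iff]
  constructor
  · rintro ⟨hkn, he⟩
    have hA : k ≤ a.length := by
      by_contra hgt
      push_neg at hgt
      have e := List.getElem_of_eq he (i := a.length) (by rw [List.length_take]; omega)
      rw [List.getElem_take, List.getElem_drop] at e
      have e2 : (a ++ pvSep :: b)[(a ++ pvSep :: b).length - k + a.length]'(by omega) = pvSep := by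
        rw [← e]
        exact pvSepAt a b (by omega)
      have := pvSep_pos a b ha hb _ (by omega) e2
      omega
    have hB : k ≤ b.length := by
      by_contra hgt
      push_neg at hgt
      have e := List.getElem_of_eq he (i := k - b.length - 1) (by rw [List.length_take]; omega)
      rw [List.getElem_take, List.getElem_drop] at e
      have hidx : (a ++ pvSep :: b).length - k + (k - b.length - 1) = a.length := by omega
      have e2 : (a ++ pvSep :: b)[k - b.length - 1]'(by omega) = pvSep := by
        rw [e]
        simp only [hidx]
        exact pvSepAt a b (by omega)
      have := pvSep_pos a b ha hb _ (by omega) e2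
      omega
    refine ⟨hA, hB, ?_⟩
    rw [pvTake_sep a b k hA, pvDrop_sep a b k hB] at he
    exact he
  · rintro ⟨hA, hB, he⟩
    refine ⟨by omega, ?_⟩
    rw [pvTake_sep a b k hA, pvDrop_sep a b k hB]
    exact he

lemma pvOverlap_spec (a b : List Char) (ha : pvSep ∉ a) (hb : pvSep ∉ b) :
    (pvOverlapKmp a b ≤ a.length ∧ pvOverlapKmp a b ≤ b.length ∧
     a.take (pvOverlapKmp a b) = b.drop (b.length - pvOverlapKmp a b)) ∧
    (∀ k, k ≤ a.length → k ≤ b.length → a.take k = b.drop (b.length - k) →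
      k ≤ pvOverlapKmp a b) := by
  constructor
  · rw [← pvBorder_sep a b ha hb, pvOverlapKmp_eq_maxBorder]
    exact pvMaxBorder_spec _ (by simp)
  · intro k h1 h2 h3
    rw [pvOverlapKmp_eq_maxBorder]
    exact pvMaxBorder_ge _ _ ((pvBorder_sep a b ha hb k).mpr ⟨h1, h2, h3⟩)

-- ---------- final characterisations and verdict ----------

lemma pvMatch_eq_valid (l1 l2 : List Char) (k : Nat) (hk : 0 < k) :
    pvMatch l1 l2 (k : Int) =
      (decide (l1.take k = l2.drop (l2.length - k)) ||
       decide (l2.take k = l1.drop (l1.length - k))) := by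
  unfold pvMatch
  rw [PySem.List.slice_to_natCast, PySem.List.slice_to_natCast,
      PySem.List.slice_from_neg_natCast l2 k hk, PySem.List.slice_from_neg_natCast l1 k hk]
  congr 1
  exact decide_eq_decide.mpr eq_comm

lemma pvA_char (c1 c2 : String) (t : Int)
    (h1 : c1.toList ≠ []) (h2 : c2.toList ≠ []) :
    (has_significant_overlap_py c1 c2 t = true ↔
      (t ≤ 0 ∨ ∃ k : Nat, 0 < k ∧ k < min c1.toList.length c2.toList.length ∧ t ≤ (k : Int) ∧
        (c1.toList.take k = c2.toList.drop (c2.toList.length - k) ∨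
         c2.toList.take k = c1.toList.drop (c1.toList.length - k)))) := by
  unfold has_significant_overlap_py
  set l1 := c1.toList with hl1
  set l2 := c2.toList with hl2
  have hemp : (l1.isEmpty || l2.isEmpty) = false := by
    simp [List.isEmpty_iff, h1, h2]
  simp only [hemp, Bool.false_eq_true, if_false]
  set m : Nat := min l1.length l2.length with hm
  have hfun : (fun (acc i : Int) =>
      let acc1 := if PySem.List.slice l1 none (some i) = PySem.List.slice l2 (some (-i)) none
                  then max acc i else acc
      if PySem.List.slice l1 (some (-i)) none = PySem.List.slice l2 none (some i)
      then max acc1 i else acc1)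
      = (fun (acc i : Int) => if pvMatch l1 l2 i then max acc i else acc) := by
    funext acc i
    exact pvStep l1 l2 acc i
  rw [hfun, decide_eq_true_eq, pvFoldMax]
  constructor
  · rintro (h | ⟨i, hi, hp, hti⟩)
    · exact Or.inl h
    · by_cases ht0 : t ≤ 0
      · exact Or.inl ht0
      · right
        rw [PySem.List.mem_pyRange_one] at hi
        obtain ⟨kk, rfl⟩ : ∃ kk : Nat, i = (kk : Int) := ⟨i.toNat, by omega⟩
        have hk0 : 0 < kk := by omega
        have hkm : kk < m := by exact_mod_cast hi.2
        rw [pvMatch_eq_valid l1 l2 kk hk0] at hp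
        refine ⟨kk, hk0, hkm, hti, ?_⟩
        simpa using hp
  · rintro (h | ⟨k, hk0, hkm, hkt, hv⟩)
    · exact Or.inl h
    · right
      refine ⟨(k : Int), PySem.List.mem_pyRange_one.mpr
        ⟨by exact_mod_cast Nat.zero_le k, by exact_mod_cast hkm⟩, ?_, hkt⟩
      rw [pvMatch_eq_valid l1 l2 k hk0]
      simpa using hv

lemma pvB_char (c1 c2 : String) (t : Int)
    (h1 : c1.toList ≠ []) (h2 : c2.toList ≠ [])
    (d1 : pvSep ∉ c1.toList) (d2 : pvSep ∉ c2.toList) :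
    (has_significant_overlap_py_alt c1 c2 t = true ↔
      (t ≤ 0 ∨ ∃ k : Nat, k ≤ min c1.toList.length c2.toList.length ∧ t ≤ (k : Int) ∧
        (c1.toList.take k = c2.toList.drop (c2.toList.length - k) ∨
         c2.toList.take k = c1.toList.drop (c1.toList.length - k)))) := by
  unfold has_significant_overlap_py_alt
  set l1 := c1.toList with hl1
  set l2 := c2.toList with hl2
  have hemp : (l1.isEmpty || l2.isEmpty) = false := by
    simp [List.isEmpty_iff, h1, h2]
  simp only [hemp, Bool.false_eq_true, if_false, decide_eq_true_eq]
  obtain ⟨⟨sa1, sb1, sv1⟩, smax1⟩ := pvOverlap_spec l1 l2 d1 d2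
  obtain ⟨⟨sa2, sb2, sv2⟩, smax2⟩ := pvOverlap_spec l2 l1 d2 d1
  constructor
  · intro h
    by_cases ht0 : t ≤ 0
    · exact Or.inl ht0
    · right
      rw [Nat.cast_max] at h
      rcases le_max_iff.mp h with h' | h'
      · exact ⟨pvOverlapKmp l1 l2, le_min sa1 sb1, h', Or.inl sv1⟩
      · exact ⟨pvOverlapKmp l2 l1, le_min sb2 sa2, h', Or.inr sv2⟩
  · rintro (h | ⟨k, hkm, hkt, hv⟩)
    · have h0 : (0:Int) ≤ ↑(max (pvOverlapKmp l1 l2) (pvOverlapKmp l2 l1)) := by positivity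
      omega
    · rcases hv with hv | hv
      · have hk : k ≤ pvOverlapKmp l1 l2 :=
          smax1 k (le_trans hkm (min_le_left _ _)) (le_trans hkm (min_le_right _ _)) hv
        have hc : (k:Int) ≤ ↑(max (pvOverlapKmp l1 l2) (pvOverlapKmp l2 l1)) := by
          exact_mod_cast le_trans hk (le_max_left _ _)
        omega
      · have hk : k ≤ pvOverlapKmp l2 l1 :=
          smax2 k (le_trans hkm (min_le_right _ _)) (le_trans hkm (min_le_left _ _)) hv
        have hc : (k:Int) ≤ ↑(max (pvOverlapKmp l1 l2) (pvOverlapKmp l2 l1)) := by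
          exact_mod_cast le_trans hk (le_max_right _ _)
        omega

-- a prefix of length k is a suffix iff it equals the length-k end slice
lemma pvOvIff (x y : List Char) (k : Nat) (hx : k ≤ x.length) (hy : k ≤ y.length) :
    (x.take k <:+ y) ↔ x.take k = y.drop (y.length - k) := by
  constructor
  · intro h
    have h2 := pvSuffix_eq_drop _ _ h
    rwa [List.length_take, Nat.min_eq_left hx] at h2
  · intro h
    rw [h]
    exact List.drop_suffix _ _

lemma pvSepOfDom (c1 c2 : String) (t : Int)
    (h : Dom_has_significant_overlap_py c1 c2 t) :
    pvSep ∉ c1.toList ∧ pvSep ∉ c2.toList := by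
  unfold Dom_has_significant_overlap_py at h
  simp only [Bool.and_eq_true] at h
  obtain ⟨⟨hc1, hc2⟩, -⟩ := h
  constructor <;>
  · intro hmem
    first
    | exact absurd ((List.all_eq_true.mp hc1) _ hmem) (by simp [pvDomChar, pvSep])
    | exact absurd ((List.all_eq_true.mp hc2) _ hmem) (by simp [pvDomChar, pvSep])

-- ===== VERDICT (by name: the statement is the Claim_ definition above) =====
theorem has_significant_overlap_py_spec : Claim_unchanged_has_significant_overlap_py := by
  intro c1 c2 t hdom
  intro hnD
  by_cases h1 : c1.toList = []
  · simp [has_significant_overlap_py, has_significant_overlap_py_alt, h1]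
  · by_cases h2 : c2.toList = []
    · simp [has_significant_overlap_py, has_significant_overlap_py_alt, h2]
    · obtain ⟨d1, d2⟩ := pvSepOfDom c1 c2 t hdom
      rw [Bool.eq_iff_iff, pvA_char c1 c2 t h1 h2, pvB_char c1 c2 t h1 h2 d1 d2]
      set m : Nat := min c1.toList.length c2.toList.length with hm
      constructor
      · rintro (h | ⟨k, hk0, hkm, hkt, hv⟩)
        · exact Or.inl h
        · exact Or.inr ⟨k, le_of_lt hkm, hkt, hv⟩
      · rintro (h | ⟨k, hkm, hkt, hv⟩)
        · exact Or.inl h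
        · by_cases ht0 : t ≤ 0
          · exact Or.inl ht0
          · by_cases hex : ∃ i : Nat, i < m ∧ t ≤ (i : Int) ∧
              (c1.toList.take i = c2.toList.drop (c2.toList.length - i) ∨
               c2.toList.take i = c1.toList.drop (c1.toList.length - i))
            · obtain ⟨i, him, hit, hiv⟩ := hex
              exact Or.inr ⟨i, by omega, him, hit, hiv⟩
            · exfalso
              apply hnD
              have hkm' : k = m := by
                by_contra hne
                exact hex ⟨k, by omega, hkt, hv⟩
              subst hkm'
              have hm1 : m ≤ c1.toList.length := min_le_left _ _
              have hm2 : m ≤ c2.toList.length := min_le_right _ _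
              refine ⟨by omega, hkt, ?_, ?_⟩
              · rcases hv with hv | hv
                · exact Or.inl ((pvOvIff _ _ m hm1 hm2).mpr hv)
                · exact Or.inr ((pvOvIff _ _ m hm2 hm1).mpr hv)
              · intro i him hit hV
                have hi1 : i ≤ c1.toList.length := by omega
                have hi2 : i ≤ c2.toList.length := by omega
                rcases hV with hV | hV
                · exact hex ⟨i, him, hit, Or.inl ((pvOvIff _ _ i hi1 hi2).mp hV)⟩
                · exact hex ⟨i, him, hit, Or.inr ((pvOvIff _ _ i hi2 hi1).mp hV)⟩

theorem has_significant_overlap_py_changed : Claim_changed_has_significant_overlap_py := by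
  unfold Claim_changed_has_significant_overlap_py
  decide

theorem has_significant_overlap_py_tight : Claim_exact_has_significant_overlap_py := by
  intro c1 c2 t hdom hD
  obtain ⟨ht1, htm, hfull, hnone⟩ := hD
  obtain ⟨d1, d2⟩ := pvSepOfDom c1 c2 t hdom
  have hm1 : min c1.toList.length c2.toList.length ≤ c1.toList.length := min_le_left _ _
  have hm2 : min c1.toList.length c2.toList.length ≤ c2.toList.length := min_le_right _ _
  have hmge : 1 ≤ min c1.toList.length c2.toList.length := by exact_mod_cast le_trans ht1 htm
  have h1 : c1.toList ≠ [] := by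
    rw [← List.length_pos_iff]
    omega
  have h2 : c2.toList ≠ [] := by
    rw [← List.length_pos_iff]
    omega
  have hA : ¬ (has_significant_overlap_py c1 c2 t = true) := by
    rw [pvA_char c1 c2 t h1 h2]
    rintro (h | ⟨k, hk0, hkm, hkt, hv⟩)
    · omega
    · apply hnone k hkm hkt
      rcases hv with hv | hv
      · exact Or.inl ((pvOvIff _ _ k (by omega) (by omega)).mpr hv)
      · exact Or.inr ((pvOvIff _ _ k (by omega) (by omega)).mpr hv)
  have hB : has_significant_overlap_py_alt c1 c2 t = true := by
    rw [pvB_char c1 c2 t h1 h2 d1 d2]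
    refine Or.inr ⟨min c1.toList.length c2.toList.length, le_rfl, htm, ?_⟩
    rcases hfull with hv | hv
    · exact Or.inl ((pvOvIff _ _ _ hm1 hm2).mp hv)
    · exact Or.inr ((pvOvIff _ _ _ hm2 hm1).mp hv)
  intro heq
  exact hA (heq.trans hB)
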